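-- pv_equiv track=rewrite | github.com/ahmedqamesh/mopshub-readout-sw | test_files/remove_figure_background.py | find_background_color
-- ===== SOURCE A (Python) =====
-- def find_background_color(image_data):
--     # Count the number of times each color appears in the image
--     color_counts = {}
--     for color in image_data:
--         if color in color_counts:
--             color_counts[color] += 1
--         else:
--             color_counts[color] = 1
--
--     # Find the most frequent color
--     max_count = max(color_counts.values())
--     background_color = [color for color, count in color_counts.items() if count == max_count][0]
--     return background_color
-- ===== SOURCE B (Python) =====
-- def find_background_color(image_data):
--     counts = {}
--     for color in image_data:
--         counts[color] = counts.get(color, 0) + 1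
--     # stable sort by descending count: the earliest-inserted color wins ties,
--     # exactly like A's max-then-first-match scan
--     return sorted(counts.items(), key=lambda kv: -kv[1])[0][0]
-- ===== Notes on version B (the rewrite author's own statement) =====
-- stated objective: idiomatic
-- what changed: B replaces A's membership-test dict build plus max-of-values scan plus filtering comprehension with a get-default counting loop and a single stable sort of the items by descending count, taking the first item.
import Mathlib
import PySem

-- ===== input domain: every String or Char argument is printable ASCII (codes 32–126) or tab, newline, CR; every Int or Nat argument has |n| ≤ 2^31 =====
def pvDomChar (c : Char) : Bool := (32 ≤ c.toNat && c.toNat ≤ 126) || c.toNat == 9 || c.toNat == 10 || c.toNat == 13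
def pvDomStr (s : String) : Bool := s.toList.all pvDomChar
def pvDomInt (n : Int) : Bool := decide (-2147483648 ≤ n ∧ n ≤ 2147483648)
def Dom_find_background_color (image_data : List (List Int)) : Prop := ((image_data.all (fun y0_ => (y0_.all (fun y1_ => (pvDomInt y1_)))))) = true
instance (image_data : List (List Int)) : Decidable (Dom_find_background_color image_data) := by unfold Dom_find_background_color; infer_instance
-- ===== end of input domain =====

-- B replaces A's max-of-values scan + filtering comprehension by one stable sort of the
-- counted items by descending count (first item = earliest-inserted most frequent color).

-- ===== PORT A =====
def find_background_color (image_data : List (List Int)) : List Int :=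
  let color_counts : PySem.Dict (List Int) Int :=
    image_data.foldl
      (fun d color =>
        if d.contains color then d.insert color (d.getD color 0 + 1)
        else d.insert color 1)
      PySem.Dict.empty
  match PySem.List.max? color_counts.values (fun v => v) with
  | none => []  -- Python: max([]) raises ValueError; excluded by Pre_
  | some max_count =>
      (PySem.List.pyGet? ((color_counts.items.filter (fun p : List Int × Int => p.2 == max_count)).map (fun p : List Int × Int => p.1)) 0).getD []
      -- the comprehension's [0]; pyGet? is some here because max_count is attained

-- ===== PORT B =====
def find_background_color_alt (image_data : List (List Int)) : List Int :=
  let counts : PySem.Dict (List Int) Int :=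
    image_data.foldl (fun d color => d.insert color (d.getD color 0 + 1)) PySem.Dict.empty
  match (PySem.List.sorted counts.items (fun kv => -kv.2)).head? with
  | none => []  -- Python: [0] raises IndexError; excluded by Pre_
  | some kv => kv.1

-- ===== PRECONDITION & SPEC =====
-- Pre_ excludes only the empty image, on which Python A raises ValueError (max of an empty sequence).
def Pre_find_background_color (image_data : List (List Int)) : Prop := image_data ≠ []
instance (image_data : List (List Int)) : Decidable (Pre_find_background_color image_data) := by unfold Pre_find_background_color; infer_instance
def pvWitness_find_background_color : List (List Int) := [[1, 2], [3], [1, 2]]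

def Spec_find_background_color (image_data : List (List Int)) (out : List Int) : Prop := out = find_background_color_alt image_data
instance (image_data : List (List Int)) (out : List Int) : Decidable (Spec_find_background_color image_data out) := by unfold Spec_find_background_color; infer_instance

-- ===== CLAIM (what is proved, stated in full; the proofs are below) =====
def Claim_equal_find_background_color : Prop := ∀ (image_data : List (List Int)), Dom_find_background_color image_data → Pre_find_background_color image_data → Spec_find_background_color image_data (find_background_color image_data)

-- ===== LEMMAS AND PROOFS =====

-- "first pair attaining the maximal count", as a left fold (an earlier pair survives ties)
def fmStep (acc : Option (List Int × Int)) (p : List Int × Int) : Option (List Int × Int) :=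
  match acc with
  | none => some p
  | some q => if q.2 < p.2 then some p else some q

def fm (l : List (List Int × Int)) : Option (List Int × Int) := l.foldl fmStep none

theorem fm_append (l : List (List Int × Int)) (x : List Int × Int) :
    fm (l ++ [x]) = fmStep (fm l) x := by
  simp [fm, List.foldl_append]

theorem fm_eq_none_iff (l : List (List Int × Int)) : fm l = none ↔ l = [] := by
  induction l using List.reverseRecOn with
  | nil => simp [fm]
  | append_singleton t x ih =>
    rw [fm_append]
    constructor
    · intro h
      exfalso
      cases hf : fm t <;> rw [hf] at h <;> simp only [fmStep] at h
      · exact Option.some_ne_none _ h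
      · split at h <;> exact Option.some_ne_none _ h
    · intro h; simp at h

theorem fm_spec (l : List (List Int × Int)) (p : List Int × Int) (hp : fm l = some p) :
    p ∈ l ∧ (∀ q ∈ l, q.2 ≤ p.2) ∧ (l.filter (fun q => q.2 == p.2)).head? = some p := by
  induction l using List.reverseRecOn generalizing p with
  | nil => simp [fm] at hp
  | append_singleton t x ih =>
    rw [fm_append] at hp
    cases hf : fm t with
    | none =>
      have ht : t = [] := (fm_eq_none_iff t).1 hf
      subst ht
      rw [hf] at hp
      simp only [fmStep] at hp
      cases hp
      simp
    | some q =>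
      obtain ⟨hmem, hmax, hfil⟩ := ih q hf
      rw [hf] at hp
      simp only [fmStep] at hp
      by_cases hlt : q.2 < x.2
      · rw [if_pos hlt] at hp
        cases hp
        refine ⟨by simp, ?_, ?_⟩
        · intro r hr
          rcases List.mem_append.1 hr with h | h
          · exact le_of_lt (lt_of_le_of_lt (hmax r h) hlt)
          · simp at h; subst h; exact le_refl _
        · have hft : t.filter (fun q => q.2 == x.2) = [] := by
            rw [List.filter_eq_nil_iff]
            intro r hr
            have := lt_of_le_of_lt (hmax r hr) hlt
            simp only [beq_iff_eq]
            omega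
          rw [List.filter_append, hft]
          simp
      · rw [if_neg hlt] at hp
        cases hp
        refine ⟨List.mem_append.2 (Or.inl hmem), ?_, ?_⟩
        · intro r hr
          rcases List.mem_append.1 hr with h | h
          · exact hmax r h
          · simp at h; subst h; omega
        · rw [List.filter_append, List.head?_append_of_ne_nil]
          · exact hfil
          · intro h; rw [h] at hfil; simp at hfil

theorem head?_insertBy (before : (List Int × Int) → (List Int × Int) → Bool) (x h : List Int × Int) (tl : List (List Int × Int)) :
    (PySem.List.insertBy before x (h :: tl)).head? = if before x h then some x else some h := by
  unfold PySem.List.insertBy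
  split <;> rfl

theorem sorted_head (l : List (List Int × Int)) :
    (PySem.List.sorted l (fun kv => -kv.2)).head? = fm l := by
  induction l using List.reverseRecOn with
  | nil => simp [fm, PySem.List.sorted]
  | append_singleton t x ih =>
    rw [PySem.List.sorted_eq_foldl_insertBy, List.foldl_append,
        ← PySem.List.sorted_eq_foldl_insertBy, fm_append]
    cases hs : PySem.List.sorted t (fun kv => -kv.2) with
    | nil =>
      have ht : t = [] := (PySem.List.sorted_eq_nil_iff t _ false).1 hs
      subst ht
      simp [PySem.List.insertBy, fm, fmStep]
    | cons h tl =>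
      have hh : fm t = some h := by rw [← ih, hs]; rfl
      rw [hh]
      simp only [List.foldl_cons, List.foldl_nil, fmStep]
      by_cases hlt : (-x.2 : Int) < -h.2
      · rw [head?_insertBy, if_pos (by simpa using hlt), if_pos (by omega)]
      · rw [head?_insertBy, if_neg (by simpa using hlt), if_neg (by omega)]

theorem build_eq (l : List (List Int)) (d : PySem.Dict (List Int) Int) :
    l.foldl (fun d color =>
        if d.contains color then d.insert color (d.getD color 0 + 1)
        else d.insert color 1) d
      = l.foldl (fun d color => d.insert color (d.getD color 0 + 1)) d := by
  induction l generalizing d with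
  | nil => rfl
  | cons c t ih =>
    simp only [List.foldl_cons]
    by_cases hc : d.contains c = true
    · rw [if_pos hc]; exact ih _
    · rw [if_neg hc, PySem.Dict.getD_of_not_contains d 0 (by simpa using hc)]
      norm_num
      exact ih _

-- ===== VERDICT (by name: the statement is the Claim_ definition above) =====
theorem find_background_color_spec : Claim_equal_find_background_color := by
  intro image_data _ hpre
  unfold Spec_find_background_color
  simp only [find_background_color, find_background_color_alt]
  rw [build_eq, PySem.Dict.foldl_insert_getD_add_one_eq_counter]
  set l := (PySem.Dict.counter image_data).items with hl
  have hlne : l ≠ [] := by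
    rw [hl, PySem.Dict.items_counter]
    cases image_data with
    | nil => exact absurd rfl hpre
    | cons a t =>
      intro h
      rw [List.map_eq_nil_iff] at h
      have ha : a ∈ PySem.Set.ofList (a :: t) := (PySem.Set.mem_ofList _ _).2 (by simp)
      rw [h] at ha
      simp at ha
  obtain ⟨p, hp⟩ : ∃ p, fm l = some p := by
    cases hf : fm l with
    | none => exact absurd ((fm_eq_none_iff l).1 hf) hlne
    | some p => exact ⟨p, rfl⟩
  obtain ⟨hmem, hmax, hfil⟩ := fm_spec l p hp
  -- A side
  have hvals : (PySem.Dict.counter image_data).values = l.map (fun q => q.2) := rfl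
  cases hm : PySem.List.max? ((PySem.Dict.counter image_data).values) (fun v => v) with
  | none =>
    rw [PySem.List.max?_eq_none_iff] at hm
    rw [hvals] at hm
    exact absurd (List.map_eq_nil_iff.1 hm) hlne
  | some m =>
    have hmle : m ≤ p.2 := by
      have := PySem.List.max?_mem hm
      rw [hvals, List.mem_map] at this
      obtain ⟨q, hq, hq2⟩ := this
      rw [← hq2]; exact hmax q hq
    have hple : p.2 ≤ m := by
      have := PySem.List.max?_isMax hm p.2 (by rw [hvals]; exact List.mem_map.2 ⟨p, hmem, rfl⟩)
      simpa using this
    have hme : m = p.2 := le_antisymm hmle hple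
    subst hme
    cases hfl : l.filter (fun q => q.2 == p.2) with
    | nil => rw [hfl] at hfil; simp at hfil
    | cons a rest =>
      rw [hfl] at hfil
      simp only [List.head?_cons, Option.some.injEq] at hfil
      subst hfil
      simp [hfl, sorted_head, hp, PySem.List.pyGet?, PySem.List.pyIdx?]
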